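-- pv_equiv track=rewrite | github.com/wolfthewizard/jftt_language_compiler | core/LangTranslator.py | __generate_constant
-- ===== SOURCE A (Python) =====
-- def __generate_constant(value: int, register) -> str:
--     commands = []
--     while value:
--         if value % 2:
--             commands.append("INC {}".format(register))
--             value -= 1
--         else:
--             commands.append("SHL {}".format(register))
--             value //= 2
--     commands.append("RESET {}".format(register))
--     return "\n".join(commands[::-1])
-- ===== SOURCE B (Python) =====
-- def __generate_constant(value: int, register) -> str:
--     commands = ["RESET {}".format(register)]
--     for i, bit in enumerate(format(value, 'b') if value else ''):
--         if i:
--             commands.append("SHL {}".format(register))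
--         if bit == '1':
--             commands.append("INC {}".format(register))
--     return "\n".join(commands)
-- ===== Notes on version B (the rewrite author's own statement) =====
-- stated objective: idiomatic
-- what changed: B precomputes the binary string of value once with format(value,'b') and emits the commands in forward MSB-to-LSB order (INC for the leading bit, then SHL plus INC per set bit), instead of A's LSB-first consumption by repeated subtract/halve into a list that is reversed at the end.
import Mathlib
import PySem

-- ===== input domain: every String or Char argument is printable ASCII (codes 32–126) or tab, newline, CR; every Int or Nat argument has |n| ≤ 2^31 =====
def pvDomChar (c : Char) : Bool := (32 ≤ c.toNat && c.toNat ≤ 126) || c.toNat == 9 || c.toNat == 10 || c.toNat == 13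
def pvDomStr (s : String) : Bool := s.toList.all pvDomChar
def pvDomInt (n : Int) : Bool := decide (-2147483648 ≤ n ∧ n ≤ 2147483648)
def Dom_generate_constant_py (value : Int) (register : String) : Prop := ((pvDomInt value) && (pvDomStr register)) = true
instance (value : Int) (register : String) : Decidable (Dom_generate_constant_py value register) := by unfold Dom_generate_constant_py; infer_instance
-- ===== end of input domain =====

-- B emits the constant-building commands forward over the precomputed binary string (format(value,'b')),
-- instead of A's LSB-first subtract/halve loop with a final list reversal; objective: idiomatic.


-- ===== PORT A =====
-- the `while value:` loop; fuel is only a termination device — 2*value.toNat+1 steps always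
-- suffice when 0 ≤ value (proved in loopA_eq_lsb below); for value < 0 Python diverges (outside Pre_)
def pvLoopA (fuel : Nat) (value : Int) (register : String) (commands : List String) : List String :=
  match fuel with
  | 0 => commands
  | f + 1 =>
    if value ≠ 0 then
      if PySem.Int.mod value 2 ≠ 0 then
        pvLoopA f (value - 1) register (commands ++ ["INC " ++ register])
      else
        pvLoopA f (PySem.Int.floordiv value 2) register (commands ++ ["SHL " ++ register])
    else commands

def generate_constant_py (value : Int) (register : String) : String :=
  let commands := pvLoopA (2 * value.toNat + 1) value register []
  let commands := commands ++ ["RESET " ++ register]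
  PySem.Str.join "\n" commands.reverse   -- commands[::-1] (PySem.List.slice?_none_none_neg_one)

-- ===== PORT B =====
def generate_constant_py_alt (value : Int) (register : String) : String :=
  let bits : List Char := if value ≠ 0 then PySem.Int.toBinChars value else []  -- format(value,'b') if value else ''
  let commands := (PySem.List.enumerate bits).foldl
    (fun commands p =>
      let commands := if p.1 ≠ 0 then commands ++ ["SHL " ++ register] else commands
      if p.2 = '1' then commands ++ ["INC " ++ register] else commands)
    ["RESET " ++ register]
  PySem.Str.join "\n" commands

-- ===== PRECONDITION & SPEC =====
-- Pre_ excludes value < 0, on which A's while-loop never terminates (Python diverges, returns nothing).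
def Pre_generate_constant_py (value : Int) (register : String) : Prop := 0 ≤ value
instance (value : Int) (register : String) : Decidable (Pre_generate_constant_py value register) := by
  unfold Pre_generate_constant_py; infer_instance

def pvWitness_generate_constant_py : Int × String := (6, "b")

def Spec_generate_constant_py (value : Int) (register : String) (out : String) : Prop := out = generate_constant_py_alt value register
instance (value : Int) (register : String) (out : String) : Decidable (Spec_generate_constant_py value register out) := by unfold Spec_generate_constant_py; infer_instance

-- ===== CLAIM (what is proved, stated in full; the proofs are below) =====
def Claim_equal_generate_constant_py : Prop := ∀ (value : Int) (register : String), Dom_generate_constant_py value register → Pre_generate_constant_py value register → Spec_generate_constant_py value register (generate_constant_py value register)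

-- ===== LEMMAS AND PROOFS =====

-- the command list A's loop produces, as a structural recursion on value.toNat
def pvLsb (register : String) (n : Nat) : List String :=
  if h : n = 0 then []
  else if n % 2 = 1 then ("INC " ++ register) :: pvLsb register (n - 1)
  else ("SHL " ++ register) :: pvLsb register (n / 2)
termination_by n
decreasing_by
  · omega
  · omega

-- the command segment B emits for one enumerated bit
def pvSeg (register : String) (p : Int × Char) : List String :=
  (if p.1 ≠ 0 then ["SHL " ++ register] else []) ++ (if p.2 = '1' then ["INC " ++ register] else [])

lemma pvLoopA_eq_lsb (register : String) :
    ∀ (n f : Nat), 2 * n + 1 ≤ f → ∀ (cs : List String),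
      pvLoopA f (n : Int) register cs = cs ++ pvLsb register n := by
  intro n
  induction n using Nat.strong_induction_on with
  | _ n ih =>
    intro f hf cs
    match f with
    | 0 => omega
    | f + 1 =>
      rw [pvLoopA]
      by_cases h0 : n = 0
      · subst h0; simp [pvLsb]
      · have hne : (n : Int) ≠ 0 := by exact_mod_cast h0
        rw [if_pos hne]
        have hmod : PySem.Int.mod (n : Int) 2 = ((n % 2 : Nat) : Int) := by
          exact_mod_cast PySem.Int.mod_natCast n 2
        rw [pvLsb, dif_neg h0]
        by_cases hodd : n % 2 = 1
        · rw [if_pos (show PySem.Int.mod (n : Int) 2 ≠ 0 by rw [hmod, hodd]; simp),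
            if_pos hodd, show (n : Int) - 1 = ((n - 1 : Nat) : Int) by omega,
            ih (n - 1) (by omega) f (by omega)]
          simp
        · have h2 : n % 2 = 0 := by omega
          rw [if_neg (show ¬ PySem.Int.mod (n : Int) 2 ≠ 0 by rw [hmod, h2]; simp),
            if_neg hodd,
            show PySem.Int.floordiv (n : Int) 2 = ((n / 2 : Nat) : Int) from by
              exact_mod_cast PySem.Int.floordiv_natCast n 2,
            ih (n / 2) (by omega) f (by omega)]
          simp

lemma pvLsb_reverse_eq_flatMap (register : String) :
    ∀ (n : Nat), 0 < n →
      (pvLsb register n).reverse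
        = (PySem.List.enumerate (Nat.toDigits 2 n)).flatMap (pvSeg register) := by
  intro n
  induction n using Nat.strong_induction_on with
  | _ n ih =>
    intro hn
    by_cases h1 : n = 1
    · subst h1
      rw [show Nat.toDigits 2 1 = ['1'] from Nat.toDigits_of_lt_base (by decide)]
      rw [pvLsb]; rw [pvLsb]
      simp [pvSeg, PySem.List.enumerate_cons, PySem.List.enumerate_nil]
    · -- n ≥ 2
      have h2 : 2 ≤ n := by omega
      have hdig : Nat.toDigits 2 n = Nat.toDigits 2 (n / 2) ++ [(n % 2).digitChar] := by
        rw [Nat.toDigits_eq_if (by omega : 1 < 2)]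
        simp [show ¬ n < 2 by omega]
      have hhalf : 0 < n / 2 := by omega
      have hlenpos : 0 < (Nat.toDigits 2 (n / 2)).length := Nat.length_toDigits_pos
      have hnil : Nat.toDigits 2 (n / 2) ≠ [] := List.ne_nil_of_length_pos hlenpos
      have henum : PySem.List.enumerate (Nat.toDigits 2 n)
          = PySem.List.enumerate (Nat.toDigits 2 (n / 2))
            ++ [(((Nat.toDigits 2 (n / 2)).length : Int), (n % 2).digitChar)] := by
        rw [hdig, PySem.List.enumerate_append]
        simp [PySem.List.enumerate_cons]
      have hIH := ih (n / 2) (by omega) hhalf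
      by_cases hodd : n % 2 = 1
      · -- n odd, n ≥ 3: the loop emits INC then SHL, since n-1 is even and positive
        have hstep : pvLsb register n
            = ("INC " ++ register) :: ("SHL " ++ register) :: pvLsb register (n / 2) := by
          rw [pvLsb]
          simp only [show n ≠ 0 by omega, dif_neg, hodd, if_true, not_false_eq_true]
          rw [pvLsb]
          have hm : (n - 1) % 2 = 0 := by omega
          have hd : (n - 1) / 2 = n / 2 := by omega
          simp [show n - 1 ≠ 0 by omega, hm, hd]
        have hseg : pvSeg register (((Nat.toDigits 2 (n / 2)).length : Int), (n % 2).digitChar)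
            = ["SHL " ++ register, "INC " ++ register] := by
          rw [hodd]
          simp [pvSeg, hnil, show Nat.digitChar 1 = '1' from rfl]
        rw [hstep, henum]
        simp only [List.flatMap_append, List.reverse_cons]
        rw [hIH]
        simp [hseg]
      · -- n even: the loop emits SHL only
        have hm : n % 2 = 0 := by omega
        have hstep : pvLsb register n = ("SHL " ++ register) :: pvLsb register (n / 2) := by
          rw [pvLsb]
          simp [show n ≠ 0 by omega, hodd]
        have hseg : pvSeg register (((Nat.toDigits 2 (n / 2)).length : Int), (n % 2).digitChar)
            = ["SHL " ++ register] := by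
          rw [hm]
          simp [pvSeg, hnil, show Nat.digitChar 0 ≠ '1' by decide]
        rw [hstep, henum]
        simp only [List.flatMap_append, List.reverse_cons]
        rw [hIH]
        simp [hseg]

-- B's foldl body appends pvSeg of each enumerated bit
lemma pvFoldB_eq (register : String) (bits : List Char) (init : List String) :
    (PySem.List.enumerate bits).foldl
      (fun commands p =>
        let commands := if p.1 ≠ 0 then commands ++ ["SHL " ++ register] else commands
        if p.2 = '1' then commands ++ ["INC " ++ register] else commands)
      init
    = init ++ (PySem.List.enumerate bits).flatMap (pvSeg register) := by
  have hfun : (fun (commands : List String) (p : Int × Char) =>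
        let commands := if p.1 ≠ 0 then commands ++ ["SHL " ++ register] else commands
        if p.2 = '1' then commands ++ ["INC " ++ register] else commands)
      = fun commands p => commands ++ pvSeg register p := by
    funext commands p
    simp only [pvSeg]
    split_ifs <;> simp
  rw [hfun, PySem.List.foldl_append_eq_flatMap]

-- ===== VERDICT (by name: the statement is the Claim_ definition above) =====
theorem generate_constant_py_spec : Claim_equal_generate_constant_py := by
  intro value register _ hpre
  unfold Spec_generate_constant_py
  obtain ⟨n, rfl⟩ : ∃ n : Nat, value = (n : Int) :=
    ⟨value.toNat, (Int.toNat_of_nonneg hpre).symm⟩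
  simp only [generate_constant_py, generate_constant_py_alt, Int.toNat_natCast]
  rw [pvLoopA_eq_lsb register n (2 * n + 1) (le_refl _) [], pvFoldB_eq]
  by_cases h0 : n = 0
  · subst h0
    rw [pvLsb]
    simp [PySem.List.enumerate_nil]
  · have hvne : ((n : Int)) ≠ 0 := by exact_mod_cast h0
    rw [if_pos hvne]
    have hbits : PySem.Int.toBinChars (n : Int) = Nat.toDigits 2 n := by
      unfold PySem.Int.toBinChars
      rw [if_neg (by omega), Int.toNat_natCast]
    rw [hbits]
    congr 1
    rw [List.nil_append, List.reverse_append,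
      ← pvLsb_reverse_eq_flatMap register n (Nat.pos_of_ne_zero h0)]
    simp
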